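-- pv_equiv track=rewrite | github.com/danylev/CodeJam | 2012/2012Q/recycled_numbers.py | same_number
-- ===== SOURCE A (Python) =====
-- from collections import deque
--
-- def same_number(x,y):
--     quu = deque(str(x))
--     checked = str(y)
--     for step in range(len(quu)):
--         if ''.join(quu) == checked:
--             return True
--         else:
--             temp = quu.pop()
--             quu.appendleft(temp)
--     return False
-- ===== SOURCE B (Python) =====
-- def same_number(x, y):
--     sx = str(x)
--     sy = str(y)
--     return len(sx) == len(sy) and sy in sx + sx
-- ===== Notes on version B (the rewrite author's own statement) =====
-- stated objective: idiomatic
-- what changed: Replaces the deque rotate-and-compare loop with the standard rotation test: equal lengths plus a single substring search of y's digits in x's digit string doubled.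
import Mathlib
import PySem

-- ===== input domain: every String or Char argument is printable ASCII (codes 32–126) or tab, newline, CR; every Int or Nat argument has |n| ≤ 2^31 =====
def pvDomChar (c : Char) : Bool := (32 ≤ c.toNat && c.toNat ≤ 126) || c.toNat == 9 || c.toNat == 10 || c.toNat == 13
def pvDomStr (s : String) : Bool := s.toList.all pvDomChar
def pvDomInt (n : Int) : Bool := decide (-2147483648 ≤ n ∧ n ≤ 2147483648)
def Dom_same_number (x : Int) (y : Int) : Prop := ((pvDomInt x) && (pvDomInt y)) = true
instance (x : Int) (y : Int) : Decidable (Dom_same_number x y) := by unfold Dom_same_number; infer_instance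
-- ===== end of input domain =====

-- B replaces A's deque rotate-and-compare loop by the standard rotation test (equal lengths
-- and y's digit string a substring of x's digit string doubled); objective: idiomatic.


-- ===== PORT A =====
-- temp = quu.pop(); quu.appendleft(temp)  (the deque is a List Char; pop on the empty
-- deque cannot happen, the loop runs len(quu) times and str(x) is never empty)
def pyRotr (l : List Char) : List Char :=
  match l.getLast? with
  | none => l
  | some temp => temp :: l.dropLast

-- for step in range(len(quu)): if ''.join(quu) == checked: return True else rotate
def pyLoop (quu checked : List Char) : Nat → Bool
  | 0 => false
  | n + 1 => if quu == checked then true else pyLoop (pyRotr quu) checked n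

def same_number (x : Int) (y : Int) : Bool :=
  let quu := (PySem.Int.toStr x).toList
  let checked := (PySem.Int.toStr y).toList
  pyLoop quu checked quu.length

-- ===== PORT B =====
def same_number_alt (x : Int) (y : Int) : Bool :=
  let sx := PySem.Int.toStr x
  let sy := PySem.Int.toStr y
  (PySem.Str.len sx == PySem.Str.len sy) && PySem.Str.isIn sy (sx ++ sx)

-- ===== PRECONDITION & SPEC =====
def Spec_same_number (x : Int) (y : Int) (out : Bool) : Prop := out = same_number_alt x y
instance (x : Int) (y : Int) (out : Bool) : Decidable (Spec_same_number x y out) := by unfold Spec_same_number; infer_instance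

-- ===== CLAIM (what is proved, stated in full; the proofs are below) =====
def Claim_equal_same_number : Prop := ∀ (x : Int) (y : Int), Dom_same_number x y → Spec_same_number x y (same_number x y)

-- ===== LEMMAS AND PROOFS =====

-- str(n) is never the empty string
theorem toDigitsCore_ne_nil (b f n : Nat) (ds : List Char) (h : ds ≠ []) :
    Nat.toDigitsCore b f n ds ≠ [] := by
  induction f generalizing n ds with
  | zero => simpa [Nat.toDigitsCore]
  | succ f ih =>
    simp only [Nat.toDigitsCore]
    split
    · simp
    · exact ih _ _ (by simp)

theorem toChars_ne_nil (n : Int) : PySem.Int.toChars n ≠ [] := by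
  unfold PySem.Int.toChars
  split
  · simp
  · unfold Nat.toDigits
    simp only [Nat.toDigitsCore]
    split
    · simp
    · exact toDigitsCore_ne_nil _ _ _ _ (by simp)

theorem pyRotr_concat (w : List Char) (a : Char) : pyRotr (w ++ [a]) = a :: w := by
  simp [pyRotr]

-- one rotation step moves the split point down by one
theorem pyRotr_drop_take (s : List Char) (m : Nat) (h1 : 1 ≤ m) (h2 : m ≤ s.length) :
    pyRotr (s.drop m ++ s.take m) = s.drop (m - 1) ++ s.take (m - 1) := by
  obtain ⟨p, rfl⟩ : ∃ p, m = p + 1 := ⟨m - 1, by omega⟩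
  have hp : p < s.length := by omega
  have htake : s.take (p + 1) = s.take p ++ [s[p]] := by
    rw [List.take_add_one, List.getElem?_eq_getElem hp]
    simp
  have hdrop : s.drop p = s[p] :: s.drop (p + 1) := List.drop_eq_getElem_cons hp
  rw [htake, ← List.append_assoc, pyRotr_concat]
  simp only [Nat.add_sub_cancel]
  rw [hdrop, List.cons_append]

-- loop invariant: with counter k the deque holds s.drop k ++ s.take k, and the loop
-- succeeds iff some split in 1..k matches the target
theorem pyLoop_iff (s t : List Char) (k : Nat) (hk : k ≤ s.length) :
    pyLoop (s.drop k ++ s.take k) t k = true ↔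
      ∃ m, 1 ≤ m ∧ m ≤ k ∧ s.drop m ++ s.take m = t := by
  induction k with
  | zero => simp [pyLoop]
  | succ k ih =>
    rw [pyLoop]
    by_cases h : s.drop (k + 1) ++ s.take (k + 1) = t
    · have hbeq : (s.drop (k + 1) ++ s.take (k + 1) == t) = true := by simp [h]
      rw [hbeq]
      simp only [if_true, true_iff]
      exact ⟨k + 1, by omega, le_refl _, h⟩
    · have hbeq : (s.drop (k + 1) ++ s.take (k + 1) == t) = false := by simp [h]
      rw [hbeq]
      simp only [Bool.false_eq_true, if_false]
      rw [pyRotr_drop_take s (k + 1) (by omega) hk]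
      simp only [Nat.add_sub_cancel]
      rw [ih (by omega)]
      constructor
      · rintro ⟨m, h1, h2, h3⟩; exact ⟨m, h1, by omega, h3⟩
      · rintro ⟨m, h1, h2, h3⟩
        refine ⟨m, h1, ?_, h3⟩
        rcases Nat.lt_or_ge m (k + 1) with hlt | hge
        · omega
        · exfalso; apply h; rwa [show m = k + 1 by omega] at h3

-- a nonempty list's rotations are exactly the equal-length infixes of the doubled list
theorem rotation_iff_infix (s t : List Char) (hs : s ≠ []) :
    (∃ m, 1 ≤ m ∧ m ≤ s.length ∧ s.drop m ++ s.take m = t) ↔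
      (t.length = s.length ∧ t <:+: s ++ s) := by
  constructor
  · rintro ⟨m, h1, h2, rfl⟩
    constructor
    · simp
      omega
    · refine ⟨s.take m, s.drop m, ?_⟩
      rw [List.append_assoc (s.take m) (s.drop m ++ s.take m) (s.drop m),
        List.append_assoc (s.drop m) (s.take m) (s.drop m), List.take_append_drop,
        ← List.append_assoc, List.take_append_drop]
  · rintro ⟨hlen, u, v, huv⟩
    have hjlen : u.length + (t.length + v.length) = s.length + s.length := by
      have := congrArg List.length huv
      simpa using this
    have hj : u.length ≤ s.length := by omega
    have ht : t = s.drop u.length ++ s.take u.length := by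
      have h1 : (s ++ s).drop u.length = t ++ v := by
        rw [← huv, List.append_assoc, List.drop_left]
      have h2 : (s ++ s).drop u.length = s.drop u.length ++ s := by
        rw [List.drop_append_of_le_length hj]
      have h3 : t ++ v = s.drop u.length ++ s := h1 ▸ h2
      have h4 : (t ++ v).take t.length = (s.drop u.length ++ s).take t.length := by rw [h3]
      rw [List.take_left] at h4
      rw [h4, List.take_append, List.take_of_length_le (by simp; omega)]
      congr 1
      congr 1
      simp
      omega
    by_cases hz : u.length = 0
    · refine ⟨s.length, ?_, le_refl _, ?_⟩
      · have : 0 < s.length := List.length_pos_iff.mpr hs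
        omega
      · rw [ht, hz]
        simp
    · exact ⟨u.length, by omega, hj, ht.symm⟩

-- A's loop, started on the full string, decides exactly the rotation predicate
theorem same_number_iff (x y : Int) :
    same_number x y = true ↔
      ((PySem.Int.toStr y).toList.length = (PySem.Int.toStr x).toList.length ∧
        (PySem.Int.toStr y).toList <:+: (PySem.Int.toStr x).toList ++ (PySem.Int.toStr x).toList) := by
  have hs : (PySem.Int.toStr x).toList ≠ [] := by
    rw [PySem.Int.toList_toStr]; exact toChars_ne_nil x
  have key := pyLoop_iff (PySem.Int.toStr x).toList (PySem.Int.toStr y).toList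
    (PySem.Int.toStr x).toList.length (le_refl _)
  rw [show (PySem.Int.toStr x).toList.drop (PySem.Int.toStr x).toList.length ++
      (PySem.Int.toStr x).toList.take (PySem.Int.toStr x).toList.length =
      (PySem.Int.toStr x).toList from by simp] at key
  show pyLoop (PySem.Int.toStr x).toList (PySem.Int.toStr y).toList
    (PySem.Int.toStr x).toList.length = true ↔ _
  rw [key]
  exact rotation_iff_infix _ _ hs

theorem same_number_alt_iff (x y : Int) :
    same_number_alt x y = true ↔
      ((PySem.Int.toStr y).toList.length = (PySem.Int.toStr x).toList.length ∧
        (PySem.Int.toStr y).toList <:+: (PySem.Int.toStr x).toList ++ (PySem.Int.toStr x).toList) := by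
  unfold same_number_alt
  simp only [Bool.and_eq_true, beq_iff_eq, PySem.Str.len_eq, PySem.Str.isIn_iff_infix,
    String.toList_append, Nat.cast_inj]
  tauto

-- ===== VERDICT (by name: the statement is the Claim_ definition above) =====
theorem same_number_spec : Claim_equal_same_number := by
  intro x y _
  unfold Spec_same_number
  rw [Bool.eq_iff_iff, same_number_iff, same_number_alt_iff]
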